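-- pv_equiv track=rewrite | github.com/drew3k/diploma | app/pipeline/utils.py | mask_email
-- ===== SOURCE A (Python) =====
-- def mask_email(email: str) -> str:
--     """Маскируем локал-парт полностью, кроме первой буквы/цифры; точки/подчёркивания/плюсы сохраняем."""
--     if "@" not in email:
--         return "".join("*" if c.isalnum() else c for c in email)
--     local, domain = email.split("@", 1)
--     if not local:
--         return "*" + ("@" + domain if domain else "")
--     out_local = []
--     kept = False
--     for ch in local:
--         if ch.isalnum():
--             if not kept:
--                 out_local.append(ch)
--                 kept = True
--             else:
--                 out_local.append("*")
--         else:
--             out_local.append(ch)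
--     return "".join(out_local) + "@" + domain
-- ===== SOURCE B (Python) =====
-- def _mask_all(s: str) -> str:
--     return "".join("*" if c.isalnum() else c for c in s)
--
--
-- def mask_email(email: str) -> str:
--     at = email.find("@")
--     if at == -1:
--         return _mask_all(email)
--     local, domain = email[:at], email[at + 1:]
--     if not local:
--         return "*" + ("@" + domain if domain else "")
--     i = next((k for k, c in enumerate(local) if c.isalnum()), None)
--     if i is None:
--         return local + "@" + domain
--     return local[:i + 1] + _mask_all(local[i + 1:]) + "@" + domain
-- ===== Notes on version B (the rewrite author's own statement) =====
-- stated objective: alternative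
-- what changed: Replaces A's single stateful loop with a kept-flag by a find-then-slice decomposition: B locates the index of the first alphanumeric character, keeps the prefix through it verbatim, and masks the remaining suffix with a uniform character map; the split at the separator is done via str.find and slicing instead of str.split.
import Mathlib
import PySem

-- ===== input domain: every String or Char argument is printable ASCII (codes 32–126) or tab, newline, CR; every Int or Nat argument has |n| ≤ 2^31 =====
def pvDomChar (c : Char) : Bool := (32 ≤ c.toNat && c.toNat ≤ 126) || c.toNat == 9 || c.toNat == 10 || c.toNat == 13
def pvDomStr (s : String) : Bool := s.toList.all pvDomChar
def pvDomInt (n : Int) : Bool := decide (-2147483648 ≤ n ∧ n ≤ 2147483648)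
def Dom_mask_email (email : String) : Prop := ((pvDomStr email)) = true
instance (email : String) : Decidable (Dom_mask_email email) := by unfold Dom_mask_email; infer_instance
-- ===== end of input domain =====

-- B replaces A's stateful flag-carrying loop by a find-then-slice decomposition (first-alnum index,
-- verbatim head, uniformly masked tail), and splits at the separator via str.find and slicing.


-- ===== PORT A =====
-- A's loop: out_local / kept accumulator, appending one char per step (Python's list.append).
def maskAStep (st : List Char × Bool) (ch : Char) : List Char × Bool :=
  if PySem.Chars.isalnum ch then
    if st.2 = false then (st.1 ++ [ch], true) else (st.1 ++ ['*'], st.2)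
  else (st.1 ++ [ch], st.2)

def mask_email (email : String) : String :=
  let cs := email.toList
  if PySem.Chars.isIn ['@'] cs = false then
    String.mk (cs.map (fun c => if PySem.Chars.isalnum c then '*' else c))
  else
    let parts := (PySem.Chars.splitMax? cs ['@'] 1).getD []
    let lc := parts.getD 0 []
    let dm := parts.getD 1 []
    if lc = [] then String.mk ('*' :: (if dm = [] then [] else '@' :: dm))
    else
      let st := lc.foldl maskAStep ([], false)
      String.mk (st.1 ++ '@' :: dm)

-- ===== PORT B =====
-- Source B's helper _mask_all: every alphanumeric becomes '*', everything else is kept.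
def maskChar (c : Char) : Char := if PySem.Chars.isalnum c then '*' else c
def maskAll (cs : List Char) : List Char := cs.map maskChar

-- slices email[:at] / email[at+1:] / local[:i+1] / local[i+1:] with the index known
-- nonnegative are List.take / List.drop (exact on that range);
-- next((k for k,c in enumerate(local) if c.isalnum()), None) is List.findIdx?.
def mask_email_alt (email : String) : String :=
  let cs := email.toList
  let atPos := PySem.Chars.find cs ['@']
  if atPos = -1 then String.mk (maskAll cs)
  else
    let lc := cs.take atPos.toNat
    let dm := cs.drop (atPos.toNat + 1)
    if lc = [] then String.mk ('*' :: (if dm = [] then [] else '@' :: dm))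
    else
      match List.findIdx? PySem.Chars.isalnum lc with
      | none => String.mk (lc ++ '@' :: dm)
      | some i => String.mk (lc.take (i + 1) ++ maskAll (lc.drop (i + 1)) ++ '@' :: dm)

-- ===== PRECONDITION & SPEC =====
def Spec_mask_email (email : String) (out : String) : Prop := out = mask_email_alt email
instance (email : String) (out : String) : Decidable (Spec_mask_email email out) := by unfold Spec_mask_email; infer_instance

-- ===== CLAIM (what is proved, stated in full; the proofs are below) =====
def Claim_equal_mask_email : Prop := ∀ (email : String), Dom_mask_email email → Spec_mask_email email (mask_email email)

-- ===== LEMMAS AND PROOFS =====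

-- B's masked local, as one function of the local part (value of B's match).
def bmask (l : List Char) : List Char :=
  match List.findIdx? PySem.Chars.isalnum l with
  | none => l
  | some i => l.take (i + 1) ++ maskAll (l.drop (i + 1))

theorem foldl_maskAStep_kept (l : List Char) (acc : List Char) :
    l.foldl maskAStep (acc, true) = (acc ++ maskAll l, true) := by
  induction l generalizing acc with
  | nil => simp [maskAll]
  | cons c t ih =>
    by_cases h : PySem.Chars.isalnum c = true <;>
      simp [maskAStep, h, ih, maskAll, maskChar]

theorem foldl_maskAStep_notkept (l : List Char) (acc : List Char) :
    l.foldl maskAStep (acc, false) =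
      (acc ++ bmask l, (List.findIdx? PySem.Chars.isalnum l).isSome) := by
  induction l generalizing acc with
  | nil => simp [bmask]
  | cons c t ih =>
    by_cases h : PySem.Chars.isalnum c = true
    · simp [maskAStep, h, foldl_maskAStep_kept, bmask, List.findIdx?_cons, maskAll]
    · simp only [List.foldl_cons, maskAStep, h, Bool.false_eq_true, if_false]
      rw [ih]
      simp only [bmask, List.findIdx?_cons, h, Bool.false_eq_true, if_false]
      cases hf : List.findIdx? PySem.Chars.isalnum t with
      | none => simp
      | some i => simp [maskAll]

-- ['@'].isPrefixOf (c :: t) only looks at the head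
theorem atPrefix_cons (c : Char) (t : List Char) :
    ['@'].isPrefixOf (c :: t) = ('@' == c) := by
  simp [List.isPrefixOf]

theorem splitOnMax_go_zero (fuel : Nat) (d : List Char) (acc : List (List Char)) :
    PySem.Chars.splitOnMax.go ['@'] fuel 0 d [] acc = (d :: acc).reverse := by
  cases fuel with
  | zero => rw [PySem.Chars.splitOnMax.go.eq_def]; simp
  | succ n =>
    cases d with
    | nil => rw [PySem.Chars.splitOnMax.go.eq_def]; simp
    | cons c t => rw [PySem.Chars.splitOnMax.go.eq_def]; simp

theorem splitOnMax_go_one (l d cur : List Char) (acc : List (List Char)) (fuel : Nat)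
    (h : '@' ∉ l) (hf : l.length < fuel) :
    PySem.Chars.splitOnMax.go ['@'] fuel 1 (l ++ '@' :: d) cur acc =
      acc.reverse ++ [cur.reverse ++ l, d] := by
  induction l generalizing fuel cur with
  | nil =>
    cases fuel with
    | zero => omega
    | succ n =>
      rw [PySem.Chars.splitOnMax.go.eq_def]
      simp only [List.nil_append, atPrefix_cons, BEq.rfl, if_true,
        if_neg (by omega : ¬ (1 : Nat) = 0)]
      rw [splitOnMax_go_zero]
      simp
  | cons c t ih =>
    cases fuel with
    | zero => omega
    | succ n =>
      have hb : ('@' == c) = false := by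
        simp; exact fun hc => h (hc ▸ List.mem_cons_self)
      rw [PySem.Chars.splitOnMax.go.eq_def]
      simp only [List.cons_append, atPrefix_cons, hb,
        Bool.false_eq_true, if_false, if_neg (by omega : ¬ (1 : Nat) = 0)]
      rw [ih (c :: cur) n (fun hm => h (List.mem_cons_of_mem _ hm)) (by simp at hf ⊢; omega)]
      simp

theorem splitOnMax_at (l d : List Char) (h : '@' ∉ l) :
    PySem.Chars.splitOnMax (l ++ '@' :: d) ['@'] 1 = [l, d] := by
  rw [PySem.Chars.splitOnMax]
  simp only [if_neg (by omega : ¬ (1 : Int) < 0), Int.toNat_one]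
  rw [splitOnMax_go_one l d [] [] _ h (by simp)]
  simp

theorem find_decompose (cs : List Char) (h : PySem.Chars.find cs ['@'] ≠ -1) :
    cs = cs.take (PySem.Chars.find cs ['@']).toNat ++
        '@' :: cs.drop ((PySem.Chars.find cs ['@']).toNat + 1) ∧
      '@' ∉ cs.take (PySem.Chars.find cs ['@']).toNat := by
  have h0 : 0 ≤ PySem.Chars.find cs ['@'] := by
    have := PySem.Chars.neg_one_le_find cs ['@']; omega
  obtain ⟨hpre, hmin⟩ := PySem.Chars.find_spec (s := cs) (sub := ['@']) h0
  set n := (PySem.Chars.find cs ['@']).toNat with hn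
  obtain ⟨t, ht⟩ := hpre
  have hdrop : cs.drop (n + 1) = t := by
    have h1 : (cs.drop n).tail = t := by rw [← ht]; rfl
    rw [List.tail_drop] at h1
    exact h1
  constructor
  · conv_lhs => rw [← List.take_append_drop n cs]
    rw [hdrop, ← ht]
    rfl
  · intro hmem
    obtain ⟨i, hi, hgi⟩ := List.getElem_of_mem hmem
    have hi' : i < n ∧ i < cs.length := by simpa using hi
    have hgi' : cs[i]'hi'.2 = '@' := by
      rw [← hgi]; simp
    apply hmin i hi'.1
    refine ⟨cs.drop (i + 1), ?_⟩
    rw [List.drop_eq_getElem_cons hi'.2, hgi']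
    rfl

theorem mask_email_eq (email : String) : mask_email email = mask_email_alt email := by
  unfold mask_email mask_email_alt
  set cs := email.toList with hcs
  by_cases hat : PySem.Chars.find cs ['@'] = -1
  · have hin : PySem.Chars.isIn ['@'] cs = false := by
      simp [PySem.Chars.isIn, hat]
    simp only [hin, hat, if_true]
    rfl
  · have hin : ¬ PySem.Chars.isIn ['@'] cs = false := by
      simp [PySem.Chars.isIn, hat]
    simp only [hin, hat, if_false]
    obtain ⟨hdec, hno⟩ := find_decompose cs hat
    set n := (PySem.Chars.find cs ['@']).toNat with hn
    have hsplit : PySem.Chars.splitMax? cs ['@'] 1 = some [cs.take n, cs.drop (n + 1)] := by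
      rw [PySem.Chars.splitMax?]
      simp only [if_neg (by simp : ¬ List.isEmpty ['@'] = true)]
      conv_lhs => rw [hdec]
      rw [splitOnMax_at _ _ hno]
    rw [hsplit]
    simp only [Option.getD_some, List.getD_cons_zero, List.getD_cons_succ]
    by_cases hl : cs.take n = ([] : List Char)
    · simp [hl]
    · simp only [if_neg hl]
      rw [foldl_maskAStep_notkept]
      cases hf : List.findIdx? PySem.Chars.isalnum (cs.take n) with
      | none => simp [bmask, hf]
      | some i => simp [bmask, hf, maskAll]

-- ===== VERDICT (by name: the statement is the Claim_ definition above) =====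
theorem mask_email_spec : Claim_equal_mask_email := by
  intro email _
  unfold Spec_mask_email
  exact mask_email_eq email
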